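-- pv_equiv track=rewrite | github.com/yogthos/ai-text-humanizer | src/atlas/fracturer.py | _validate_groups
-- ===== SOURCE A (Python) =====
-- from typing import List, Optional, Dict, Any
--
-- def _validate_groups(groups: List[List[int]], total_propositions: int) -> bool:
--     """Validate that groups cover all propositions exactly once.
--
--     Args:
--         groups: List of lists of indices.
--         total_propositions: Total number of propositions.
--
--     Returns:
--         True if groups are valid, False otherwise.
--     """
--     if not groups:
--         return False
--
--     # Collect all indices
--     all_indices = []
--     for group in groups:
--         if not isinstance(group, list):
--             return False
--         for idx in group:
--             if not isinstance(idx, int):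
--                 return False
--             if idx < 0 or idx >= total_propositions:
--                 return False
--             all_indices.append(idx)
--
--     # Check that all indices are present exactly once
--     if len(all_indices) != total_propositions:
--         return False
--
--     if set(all_indices) != set(range(total_propositions)):
--         return False
--
--     return True
-- ===== SOURCE B (Python) =====
-- def _validate_groups(groups, total_propositions):
--     """Valid iff the concatenated indices, sorted, are exactly 0..total-1."""
--     if not groups:
--         return False
--     flat = sorted(idx for group in groups for idx in group)
--     return len(flat) == total_propositions and flat == list(range(total_propositions))
-- ===== Notes on version B (the rewrite author's own statement) =====
-- stated objective: simpler
-- what changed: Replaces A's per-index range checks, length check and set-equality pass by a sort-then-compare: the flattened indices, sorted, must equal list(range(total)) (with a length guard so the range is only materialized when sizes match).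
import Mathlib
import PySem

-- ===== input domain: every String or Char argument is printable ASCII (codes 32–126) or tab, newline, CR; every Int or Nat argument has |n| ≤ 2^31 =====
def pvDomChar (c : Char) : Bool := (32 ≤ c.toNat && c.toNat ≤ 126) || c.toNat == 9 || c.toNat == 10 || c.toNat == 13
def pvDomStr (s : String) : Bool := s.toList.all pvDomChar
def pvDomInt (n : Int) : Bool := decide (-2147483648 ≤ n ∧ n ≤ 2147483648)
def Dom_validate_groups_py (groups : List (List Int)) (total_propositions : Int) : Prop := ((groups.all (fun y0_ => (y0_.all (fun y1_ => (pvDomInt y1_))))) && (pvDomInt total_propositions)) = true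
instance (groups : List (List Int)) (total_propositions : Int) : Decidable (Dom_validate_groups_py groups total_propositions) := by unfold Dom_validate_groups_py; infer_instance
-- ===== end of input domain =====

-- B replaces A's per-index range checks + length check + set-equality pass by
-- sort-then-compare: sorted(flattened indices) must equal range(total); objective: simpler.

-- ===== PORT A =====
-- inner-loop body of A: append idx to all_indices, or fail (early return False) when out of range
def pvStepA (total : Int) (acc : Option (List Int)) (idx : Int) : Option (List Int) :=
  acc.bind (fun all => if idx < 0 ∨ total ≤ idx then none else some (all ++ [idx]))

def validate_groups_py (groups : List (List Int)) (total_propositions : Int) : Bool :=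
  if groups = [] then false
  else
    -- nested loops collecting all_indices (isinstance checks are vacuous under the type convention)
    match groups.foldl (fun acc g => g.foldl (pvStepA total_propositions) acc) (some []) with
    | none => false
    | some all_indices =>
      if (all_indices.length : Int) ≠ total_propositions then false
      else if ¬ PySem.Set.equal (PySem.Set.ofList all_indices)
                 (PySem.Set.ofList (PySem.List.pyRange 0 total_propositions 1)) = true then false
      else true

-- ===== PORT B =====
def validate_groups_py_alt (groups : List (List Int)) (total_propositions : Int) : Bool :=
  if groups = [] then false
  else
    let flat := PySem.List.sorted groups.flatten (fun x => x) false
    ((flat.length : Int) == total_propositions) && (flat == PySem.List.pyRange 0 total_propositions 1)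

-- ===== PRECONDITION & SPEC =====
def Spec_validate_groups_py (groups : List (List Int)) (total_propositions : Int) (out : Bool) : Prop := out = validate_groups_py_alt groups total_propositions
instance (groups : List (List Int)) (total_propositions : Int) (out : Bool) : Decidable (Spec_validate_groups_py groups total_propositions out) := by unfold Spec_validate_groups_py; infer_instance

-- ===== CLAIM =====
def Claim_equal_validate_groups_py : Prop := ∀ (groups : List (List Int)) (total_propositions : Int), Dom_validate_groups_py groups total_propositions → Spec_validate_groups_py groups total_propositions (validate_groups_py groups total_propositions)

-- ===== LEMMAS AND PROOFS =====

theorem foldlA_none (total : Int) (l : List Int) :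
    l.foldl (pvStepA total) none = none := by
  induction l with
  | nil => rfl
  | cons x l ih => simpa [pvStepA] using ih

-- characterisation of A's inner loop over a flat list of indices
theorem charA (total : Int) (l : List Int) : ∀ (all0 : List Int),
    l.foldl (pvStepA total) (some all0) =
      if ∀ x ∈ l, 0 ≤ x ∧ x < total then some (all0 ++ l) else none := by
  induction l with
  | nil => intro all0; simp
  | cons x l ih =>
    intro all0
    by_cases hx : x < 0 ∨ total ≤ x
    · have hcond : ¬ (∀ y ∈ x :: l, 0 ≤ y ∧ y < total) := by
        intro h; rcases h x (by simp) with ⟨h1, h2⟩; omega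
      rw [List.foldl_cons]
      simp only [pvStepA, Option.bind_some, if_pos hx]
      rw [foldlA_none, if_neg hcond]
    · have hx' : 0 ≤ x ∧ x < total := by omega
      rw [List.foldl_cons]
      simp only [pvStepA, Option.bind_some, if_neg hx]
      rw [ih (all0 ++ [x])]
      by_cases hl : ∀ y ∈ l, 0 ≤ y ∧ y < total
      · simp [hx'.1, hx'.2]
      · simp [hl]

-- pigeonhole: toFinset card = length → nodup
theorem nodup_of_card (l : List Int) (h : l.toFinset.card = l.length) : l.Nodup := by
  have h2 : l.dedup.length = l.length := by rw [← List.card_toFinset]; exact h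
  exact List.dedup_eq_self.mp (List.Sublist.eq_of_length (List.dedup_sublist l) h2)

-- under range-boundedness and the length check, "no duplicates" ↔ "covers [0, total)"
theorem nodup_iff_cover (l : List Int) (total : Int)
    (hR : ∀ x ∈ l, 0 ≤ x ∧ x < total) (hlen : (l.length : Int) = total) :
    l.Nodup ↔ (∀ x, x ∈ l ↔ 0 ≤ x ∧ x < total) := by
  have hsub : l.toFinset ⊆ Finset.Ico 0 total := by
    intro x hx
    rw [List.mem_toFinset] at hx
    rw [Finset.mem_Ico]; exact hR x hx
  have hcard : (Finset.Ico (0:Int) total).card = l.length := by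
    rw [Int.card_Ico]; omega
  constructor
  · intro hnd
    have hc : l.toFinset.card = l.length := List.toFinset_card_of_nodup hnd
    have : l.toFinset = Finset.Ico 0 total :=
      Finset.eq_of_subset_of_card_le hsub (by omega)
    intro x
    rw [← List.mem_toFinset, this, Finset.mem_Ico]
  · intro hcov
    have : l.toFinset = Finset.Ico 0 total := by
      ext x; rw [List.mem_toFinset, Finset.mem_Ico]; exact hcov x
    exact nodup_of_card l (by rw [this, hcard])

-- sorted(l) = range(0,total) iff l is a permutation of the range
theorem sorted_eq_range_iff (l : List Int) (total : Int) :
    PySem.List.sorted l (fun x => x) false = PySem.List.pyRange 0 total 1 ↔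
      l.Perm (PySem.List.pyRange 0 total 1) := by
  constructor
  · intro h
    rw [← h]
    exact (PySem.List.sorted_perm l (fun x => x) false).symm
  · intro h
    exact PySem.List.sorted_eq_of_perm_of_pairwise_lt l (PySem.List.pyRange 0 total 1)
      (fun x => x) h.symm (PySem.List.pairwise_lt_pyRange_one 0 total)

-- ===== VERDICT =====
theorem validate_groups_py_spec : Claim_equal_validate_groups_py := by
  intro groups total _
  unfold Spec_validate_groups_py validate_groups_py validate_groups_py_alt
  by_cases hg : groups = []
  · simp [hg]
  rw [if_neg hg, if_neg hg, ← List.foldl_flatten]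
  set flat := groups.flatten with hflat
  rw [charA]
  have hlenS : (PySem.List.sorted flat (fun x => x) false).length = flat.length :=
    (PySem.List.sorted_perm flat (fun x => x) false).length_eq
  by_cases hR : ∀ x ∈ flat, 0 ≤ x ∧ x < total
  · rw [if_pos hR]
    by_cases hlen : (flat.length : Int) = total
    · by_cases hnd : flat.Nodup
      · -- both sides true
        have hcov := (nodup_iff_cover flat total hR hlen).mp hnd
        have hperm : flat.Perm (PySem.List.pyRange 0 total 1) := by
          refine (List.perm_ext_iff_of_nodup hnd (PySem.List.nodup_pyRange_one 0 total)).mpr ?_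
          intro x
          rw [PySem.List.mem_pyRange_one]
          exact hcov x
        have hsorted := (sorted_eq_range_iff flat total).mpr hperm
        have hset : PySem.Set.equal (PySem.Set.ofList flat)
            (PySem.Set.ofList (PySem.List.pyRange 0 total 1)) = true := by
          rw [PySem.Set.equal_iff]
          intro x
          rw [PySem.Set.mem_ofList, PySem.Set.mem_ofList, PySem.List.mem_pyRange_one]
          exact hcov x
        have ht : 0 ≤ total := by omega
        simp [hlen, hset, hsorted, ht]
      · -- duplicate: A's set-equality check fails, B's sorted list ≠ range
        have hset : ¬ PySem.Set.equal (PySem.Set.ofList flat)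
            (PySem.Set.ofList (PySem.List.pyRange 0 total 1)) = true := by
          intro h
          rw [PySem.Set.equal_iff] at h
          apply hnd
          rw [nodup_iff_cover flat total hR hlen]
          intro x
          have := h x
          rw [PySem.Set.mem_ofList, PySem.Set.mem_ofList, PySem.List.mem_pyRange_one] at this
          exact this
        have hsorted : ¬ PySem.List.sorted flat (fun x => x) false = PySem.List.pyRange 0 total 1 := by
          intro h
          exact hnd ((((sorted_eq_range_iff flat total).mp h).symm).nodup
            (PySem.List.nodup_pyRange_one 0 total))
        simp [hlen, hset, hsorted]
    · -- length check fails on both sides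
      simp [hlen, hlenS]
  · -- out-of-range index: A fails early; B's sorted list cannot equal the range
    rw [if_neg hR]
    have hsorted : ¬ PySem.List.sorted flat (fun x => x) false = PySem.List.pyRange 0 total 1 := by
      intro h
      apply hR
      intro x hx
      have hmem : x ∈ PySem.List.pyRange 0 total 1 :=
        ((sorted_eq_range_iff flat total).mp h).mem_iff.mp hx
      rw [PySem.List.mem_pyRange_one] at hmem
      exact hmem
    simp [hsorted]
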